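-- pv_equiv track=rewrite | github.com/Restel/mallows-smp | tools.py | try_insert_left
-- ===== SOURCE A (Python) =====
-- from typing import List, Tuple, Dict
--
-- def try_insert_left(i: int, k: int, list_ori: List[int], I:Dict[int,int]) -> (List[int], Dict[int,int]):
--     """Returns a preference list if it is possible to move agent i k positions up in the given preferences list.
--     Return False otherwise. I is a dictionary with n elements as keys, and their allowed inversions as values"""
--     list = list_ori.copy()
--     I_table = I.copy()
--     r = list.index(i)
--     if (r - k) < 0:
--         return [], I  # can not be moved to a negative index
--     for ind in range(1, k + 1):  # check all elements to the left from i, if they allow inversions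
--         elem = list[r - ind]
--         if I_table[elem] == 0:  # element elem can not be moved futher, as it does not allow any more inversions
--             return [], I  # can not do the insertion
--
--     # Make an insertion
--     for ind in range(r, r - k, -1):
--         elem = list[ind - 1]
--         list[ind] = elem
--         I_table[elem] -= 1
--     list[r - k] = i
--     I_table[i] = 0
--     return list, I_table
-- ===== SOURCE B (Python) =====
-- def try_insert_left(i, k, list_ori, I):
--     r = list_ori.index(i)
--     if r - k < 0:
--         return [], I
--     moved = list_ori[r - k:r]
--     if any(I[e] == 0 for e in moved):
--         return [], I
--     I_table = dict(I)
--     for e in moved: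
--         I_table[e] -= 1
--     I_table[i] = 0
--     return list_ori[:r - k] + [i] + moved + list_ori[r + 1:], I_table
-- ===== Notes on version B (the rewrite author's own statement) =====
-- stated objective: simpler
-- what changed: B replaces A's element-by-element mutating shift loop by a one-step slice reconstruction (prefix ++ [i] ++ moved block ++ suffix) and a separate budget-decrement pass over the moved block.
-- outside the precondition, e.g. on try_insert_left(3, 2, [1, 2, 3], {2: 0}): A returns ([], {2: 0}), B raises KeyError
import Mathlib
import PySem

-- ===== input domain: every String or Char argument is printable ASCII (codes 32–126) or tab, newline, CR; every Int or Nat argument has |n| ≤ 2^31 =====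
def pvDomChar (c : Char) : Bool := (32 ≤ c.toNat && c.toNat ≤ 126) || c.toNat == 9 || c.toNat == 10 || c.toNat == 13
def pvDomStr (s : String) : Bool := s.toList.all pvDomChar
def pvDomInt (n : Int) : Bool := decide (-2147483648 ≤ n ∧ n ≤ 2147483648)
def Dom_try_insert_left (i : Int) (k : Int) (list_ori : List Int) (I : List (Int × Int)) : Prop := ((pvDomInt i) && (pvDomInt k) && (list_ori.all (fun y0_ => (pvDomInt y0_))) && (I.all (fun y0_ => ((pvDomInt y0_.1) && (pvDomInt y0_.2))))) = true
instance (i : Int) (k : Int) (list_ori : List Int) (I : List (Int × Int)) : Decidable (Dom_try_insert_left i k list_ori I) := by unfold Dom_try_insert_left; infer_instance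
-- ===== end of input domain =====

-- B rebuilds the result in one step with slices (prefix ++ [i] ++ shifted block ++ suffix) and updates the
-- budgets in a separate pass over that block, instead of A's element-by-element mutating shift loop.

-- ===== PORT A =====
-- body of A's insertion loop: list[ind] = list[ind-1]; I_table[list[ind-1]] -= 1
def tilStep (st : List Int × PySem.Dict Int Int) (ind : Int) : List Int × PySem.Dict Int Int :=
  let elem := PySem.List.pyGetD st.1 (ind - 1) 0
  (PySem.List.pySetD st.1 ind elem, st.2.modify elem 0 (· - 1))

def try_insert_left (i : Int) (k : Int) (list_ori : List Int) (I : List (Int × Int)) : List Int × (List (Int × Int)) :=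
  let list := list_ori                                  -- list = list_ori.copy()
  let I_table : PySem.Dict Int Int := PySem.Dict.ofList I   -- I_table = I.copy() (dict modelled as PySem.Dict)
  match PySem.List.index? list i with
  | none => ([], I)                                     -- list.index(i) raises ValueError: excluded by Pre_
  | some rn =>
    let r : Int := rn
    if r - k < 0 then ([], I)
    else if (PySem.List.pyRange 1 (k + 1) 1).any
        (fun ind => I_table.getD (PySem.List.pyGetD list (r - ind) 0) 0 == 0) then
      ([], I)                                           -- the validation loop's early return (KeyError excluded by Pre_)
    else
      let st := (PySem.List.pyRange r (r - k) (-1)).foldl tilStep (list, I_table)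
      (PySem.List.pySetD st.1 (r - k) i, (st.2.insert i 0).items)

-- ===== PORT B =====
def try_insert_left_alt (i : Int) (k : Int) (list_ori : List Int) (I : List (Int × Int)) : List Int × (List (Int × Int)) :=
  match PySem.List.index? list_ori i with
  | none => ([], I)                                     -- list_ori.index(i) raises ValueError: excluded by Pre_
  | some rn =>
    let r : Int := rn
    if r - k < 0 then ([], I)
    else
      let moved := PySem.List.slice list_ori (some (r - k)) (some r)
      let d : PySem.Dict Int Int := PySem.Dict.ofList I
      if moved.any (fun e => d.getD e 0 == 0) then ([], I)
      else
        let I_table := moved.foldl (fun dd e => dd.modify e 0 (· - 1)) d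
        (PySem.List.slice list_ori none (some (r - k)) ++ [i] ++ moved ++ PySem.List.slice list_ori (some (r + 1)) none,
         (I_table.insert i 0).items)

-- ===== PRECONDITION & SPEC =====
-- Pre_ excludes: (a) i not in list_ori (A raises ValueError), (b) negative k (a negative move count is outside
-- the function's natural domain; A then either raises IndexError or silently overwrites an element), and
-- (c) moved-over elements missing from I (A or B raises KeyError there; A can also return ([], I) first when an
-- earlier element has a zero budget — those inputs are excluded too).
def Pre_try_insert_left (i : Int) (k : Int) (list_ori : List Int) (I : List (Int × Int)) : Prop :=
  0 ≤ k ∧ i ∈ list_ori ∧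
  (0 ≤ (((PySem.List.index? list_ori i).getD 0 : Nat) : Int) - k →
    ∀ e ∈ PySem.List.slice list_ori (some ((((PySem.List.index? list_ori i).getD 0 : Nat) : Int) - k))
        (some (((PySem.List.index? list_ori i).getD 0 : Nat) : Int)),
      e ∈ I.map Prod.fst)
instance (i : Int) (k : Int) (list_ori : List Int) (I : List (Int × Int)) : Decidable (Pre_try_insert_left i k list_ori I) := by unfold Pre_try_insert_left; infer_instance

def pvWitness_try_insert_left : Int × Int × List Int × (List (Int × Int)) := (1, 1, [2, 1], [(2, 1), (1, 0)])

def Spec_try_insert_left (i : Int) (k : Int) (list_ori : List Int) (I : List (Int × Int)) (out : List Int × (List (Int × Int))) : Prop := out = try_insert_left_alt i k list_ori I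
instance (i : Int) (k : Int) (list_ori : List Int) (I : List (Int × Int)) (out : List Int × (List (Int × Int))) : Decidable (Spec_try_insert_left i k list_ori I out) := by unfold Spec_try_insert_left; infer_instance

-- ===== CLAIM (what is proved, stated in full; the proofs are below) =====
def Claim_equal_try_insert_left : Prop := ∀ (i : Int) (k : Int) (list_ori : List Int) (I : List (Int × Int)), Dom_try_insert_left i k list_ori I → Pre_try_insert_left i k list_ori I → Spec_try_insert_left i k list_ori I (try_insert_left i k list_ori I)

-- ===== LEMMAS AND PROOFS =====

lemma check_eq (orig : List Int) (d : PySem.Dict Int Int) (rn : Nat) (k : Int)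
    (hr : rn < orig.length) (hk : 0 ≤ k) (hrk : 0 ≤ (rn : Int) - k) :
    (PySem.List.pyRange 1 (k + 1) 1).any
        (fun ind => d.getD (PySem.List.pyGetD orig ((rn : Int) - ind) 0) 0 == 0)
      = (PySem.List.slice orig (some ((rn : Int) - k)) (some (rn : Int))).any
        (fun e => d.getD e 0 == 0) := by
  rw [PySem.List.slice_toNat orig hrk (by positivity), Bool.eq_iff_iff]
  simp only [List.any_eq_true]
  constructor
  · rintro ⟨ind, hmem, hp⟩
    rw [PySem.List.mem_pyRange_one] at hmem
    rw [PySem.List.pyGetD_eq_getElem orig 0 (by omega) (by omega)] at hp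
    refine ⟨orig[((rn : Int) - ind).toNat], ?_, hp⟩
    rw [List.mem_iff_getElem]
    refine ⟨((rn : Int) - ind).toNat - ((rn : Int) - k).toNat, ?_, ?_⟩
    · simp only [List.length_take, List.length_drop]
      omega
    · rw [List.getElem_take, List.getElem_drop]
      congr 1
      omega
  · rintro ⟨e, hmem, hp⟩
    rw [List.mem_iff_getElem] at hmem
    obtain ⟨j, hj, he⟩ := hmem
    simp only [List.length_take, List.length_drop] at hj
    rw [List.getElem_take, List.getElem_drop] at he
    refine ⟨(rn : Int) - (((rn : Int) - k).toNat + j : Nat), ?_, ?_⟩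
    · rw [PySem.List.mem_pyRange_one]
      omega
    · rw [PySem.List.pyGetD_eq_getElem orig 0 (by omega) (by omega)]
      have hidx : ((rn : Int) - ((rn : Int) - ((((rn : Int) - k).toNat + j : Nat) : Int))).toNat
          = ((rn : Int) - k).toNat + j := by omega
      simp only [hidx, he]
      exact hp

lemma til_loop (orig : List Int) (d : PySem.Dict Int Int) (rn : Nat) (hr : rn < orig.length) :
    ∀ t : Nat, t ≤ rn →
    (((List.range t).map (fun j : Nat => (rn : Int) - (j : Int))).foldl tilStep (orig, d)) =
      (orig.take (rn - t + 1) ++ (orig.drop (rn - t)).take t ++ orig.drop (rn + 1),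
       ((List.range t).map (fun j => orig.getD (rn - 1 - j) 0)).foldl
         (fun dd e => dd.modify e 0 (· - 1)) d) := by
  intro t
  induction t with
  | zero =>
    intro _
    simp [List.take_append_drop]
  | succ t ih =>
    intro ht
    rw [List.range_succ, List.map_append, List.foldl_append, List.map_append, List.foldl_append,
      ih (by omega)]
    simp only [List.map_cons, List.map_nil, List.foldl_cons, List.foldl_nil]
    set A := orig.take (rn - t + 1) ++ (orig.drop (rn - t)).take t ++ orig.drop (rn + 1) with hA
    have hAlen : A.length = orig.length := by
      simp only [hA, List.length_append, List.length_take, List.length_drop]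
      omega
    have hidx : ((rn : Int) - (t : Int) - 1).toNat = rn - t - 1 := by omega
    have hidx2 : ((rn : Int) - (t : Int)).toNat = rn - t := by omega
    have helem : PySem.List.pyGetD A ((rn : Int) - (t : Int) - 1) 0 = orig[rn - t - 1]'(by omega) := by
      rw [PySem.List.pyGetD_eq_getElem A 0 (by omega) (by omega)]
      simp only [hidx, hA]
      rw [List.getElem_append_left (by simp only [List.length_append, List.length_take, List.length_drop]; omega),
          List.getElem_append_left (by simp only [List.length_take]; omega),
          List.getElem_take]
    show (PySem.List.pySetD A ((rn:Int) - t) _, _) = _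
    rw [helem]
    rw [Prod.mk.injEq]
    refine ⟨?_, ?_⟩
    · -- list component
      rw [PySem.List.pySetD_of_nonneg A _ (by omega), hidx2, hA]
      rw [List.set_append, if_pos (by simp only [List.length_append, List.length_take]; omega)]
      rw [List.set_append, if_pos (by simp only [List.length_take]; omega)]
      rw [show rn - t + 1 = (rn - t) + 1 from rfl, List.take_add_one]
      rw [List.set_append, if_neg (by simp only [List.length_take]; omega)]
      have : orig[rn - t]?.toList = [orig[rn - t]'(by omega)] := by
        rw [List.getElem?_eq_getElem (by omega)]; rfl
      rw [this]
      simp only [List.length_take]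
      have hset0 : [orig[rn - t]'(by omega)].set (rn - t - min (rn - t) orig.length) (orig[rn - t - 1]'(by omega))
          = [orig[rn - t - 1]'(by omega)] := by
        have : rn - t - min (rn - t) orig.length = 0 := by omega
        rw [this]; rfl
      rw [hset0]
      -- target middle: (orig.drop (rn - (t+1))).take (t+1)
      have hdrop : orig.drop (rn - (t + 1)) = orig[rn - t - 1]'(by omega) :: orig.drop (rn - t) := by
        rw [show rn - (t + 1) = rn - t - 1 from by omega, List.drop_eq_getElem_cons (by omega)]
        congr 2
        omega
      rw [show rn - (t + 1) + 1 = rn - t from by omega, hdrop]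
      simp [List.append_assoc]
    · -- dict component
      have : orig.getD (rn - 1 - t) 0 = orig[rn - t - 1]'(by omega) := by
        rw [List.getD_eq_getElem _ _ (by omega)]
        congr 1
        omega
      rw [this]

lemma foldl_modify_sub_items (l : List Int) (d : PySem.Dict Int Int)
    (h : ∀ e ∈ l, e ∈ d.keys) (hnd : d.keys.Nodup) :
    (l.foldl (fun dd e => dd.modify e 0 (· - 1)) d).items
      = d.items.map (fun p => (p.1, p.2 - (l.count p.1 : Int))) := by
  induction l generalizing d with
  | nil => simp
  | cons e l ih =>
    have hc : d.contains e = true := (PySem.Dict.contains_iff_mem_keys d e).mpr (h e (by simp))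
    have hkeys : (d.modify e 0 (· - 1)).keys = d.keys := by
      rw [PySem.Dict.keys_modify, PySem.Dict.keys_insert_of_contains d _ hc]
    rw [List.foldl_cons, ih _ (by intro x hx; rw [hkeys]; exact h x (by simp [hx])) (hkeys ▸ hnd)]
    show (PySem.Dict.insert d e (d.getD e 0 - 1)).items.map _ = _
    rw [PySem.Dict.items_insert_of_contains d _ hc, List.map_map]
    apply List.map_congr_left
    intro p hp
    by_cases hpe : p.1 = e
    · have : d.getD e 0 = p.2 := by
        subst hpe
        exact PySem.Dict.getD_of_mem_items d (by exact hp) hnd 0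
      simp [Function.comp, hpe, this]
      omega
    · simp [Function.comp, hpe, List.count_cons]
      omega

lemma mem_keys_ofList (I : List (Int × Int)) (e : Int) :
    e ∈ (PySem.Dict.ofList I).keys ↔ e ∈ I.map Prod.fst := by
  show e ∈ (List.foldl (fun acc p => acc.insert p.1 p.2) PySem.Dict.empty I).keys ↔ _
  rw [show (fun (acc : PySem.Dict Int Int) (p : Int × Int) => acc.insert p.1 p.2)
        = (fun acc p => acc.insert (Prod.fst p) ((fun (_ : PySem.Dict Int Int) (p : Int × Int) => p.2) acc p)) from rfl,
      PySem.Dict.keys_foldl_insert_key]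
  show e ∈ PySem.Set.update [] (I.map Prod.fst) ↔ _
  rw [show PySem.Set.update [] (I.map Prod.fst) = PySem.Set.ofList (I.map Prod.fst) from rfl,
      PySem.Set.mem_ofList]


lemma reverse_moved (orig : List Int) (rn kn : Nat) (hkr : kn ≤ rn) (hr : rn < orig.length) :
    (List.range kn).map (fun j => orig.getD (rn - 1 - j) 0)
      = ((orig.drop (rn - kn)).take kn).reverse := by
  apply List.ext_getElem
  · simp; omega
  · intro j h1 h2
    simp only [List.getElem_map, List.getElem_range, List.getElem_reverse, List.getElem_take, List.getElem_drop]
    simp only [List.length_map, List.length_range] at h1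
    rw [List.getD_eq_getElem _ _ (by omega)]
    congr 1
    simp only [List.length_take, List.length_drop] at h2 ⊢
    omega


-- set at the seam of a take-prefix
lemma set_shift (orig : List Int) (m : Nat) (hm : m < orig.length) (v : Int) (rest : List Int) :
    (orig.take (m + 1) ++ rest).set m v = orig.take m ++ v :: rest := by
  rw [List.take_add_one, List.getElem?_eq_getElem hm]
  rw [List.append_assoc, List.set_append, if_neg (by simp only [List.length_take]; omega)]
  simp only [List.length_take]
  have h0 : m - min m orig.length = 0 := by omega
  rw [h0]
  rfl

-- ===== VERDICT (by name: the statement is the Claim_ definition above) =====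
theorem try_insert_left_spec : Claim_equal_try_insert_left := by
  intro i k list_ori I _ hPre
  obtain ⟨hk, hmem, hkeys⟩ := hPre
  unfold Spec_try_insert_left
  cases h : PySem.List.index? list_ori i with
  | none =>
    exfalso
    exact List.idxOf?_eq_none_iff.mp h hmem
  | some rn =>
    obtain ⟨hlt, -, -⟩ := List.idxOf?_eq_some_iff.mp h
    simp only [h, Option.getD_some] at hkeys
    simp only [try_insert_left, try_insert_left_alt, h]
    by_cases hneg : (rn : Int) - k < 0
    · simp only [if_pos hneg]
    · simp only [if_neg hneg]
      have hge : 0 ≤ (rn : Int) - k := by omega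
      rw [check_eq list_ori (PySem.Dict.ofList I) rn k hlt hk hge]
      by_cases hany : (PySem.List.slice list_ori (some ((rn : Int) - k)) (some (rn : Int))).any
          (fun e => (PySem.Dict.ofList I).getD e 0 == 0) = true
      · simp only [if_pos hany]
      · simp only [if_neg hany]
        set kn := k.toNat with hknd
        have hkkn : k = (kn : Int) := by omega
        have hknr : kn ≤ rn := by omega
        have hrange : PySem.List.pyRange ((rn : Int)) ((rn : Int) - k) (-1)
            = (List.range kn).map (fun j : Nat => (rn : Int) - (j : Int)) := by
          have harg : ((rn : Int) - ((rn : Int) - k)).toNat = kn := by omega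
          rw [PySem.List.pyRange_neg_one, harg]
        rw [hrange, til_loop list_ori (PySem.Dict.ofList I) rn hlt kn hknr]
        have hm : ((rn : Int) - k).toNat = rn - kn := by omega
        have hslice : PySem.List.slice list_ori (some ((rn : Int) - k)) (some (rn : Int))
            = (list_ori.drop (rn - kn)).take kn := by
          rw [PySem.List.slice_toNat list_ori hge (by positivity), hm, Int.toNat_natCast,
              show rn - (rn - kn) = kn from by omega]
        have hslice0 : PySem.List.slice list_ori none (some ((rn : Int) - k)) = list_ori.take (rn - kn) := by
          rw [PySem.List.slice_to _ hge, hm]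
        have hslice2 : PySem.List.slice list_ori (some ((rn : Int) + 1)) none = list_ori.drop (rn + 1) := by
          rw [PySem.List.slice_from _ (by positivity), show ((rn : Int) + 1).toNat = rn + 1 from by omega]
        have hmem_moved : ∀ e ∈ (list_ori.drop (rn - kn)).take kn, e ∈ (PySem.Dict.ofList I).keys := by
          intro e he
          rw [mem_keys_ofList]
          have he' : e ∈ PySem.List.slice list_ori (some ((rn : Int) - k)) (some ((rn : Int))) := by
            rw [hslice]; exact he
          exact hkeys hge e he'
        rw [hslice, hslice0, hslice2, Prod.mk.injEq]
        refine ⟨?_, ?_⟩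
        · rw [PySem.List.pySetD_of_nonneg _ i hge, hm, List.append_assoc,
              set_shift list_ori (rn - kn) (by omega) i]
          simp [List.append_assoc]
        · rw [reverse_moved list_ori rn kn hknr hlt]
          have hdeq : ((((list_ori.drop (rn - kn)).take kn).reverse).foldl
                (fun dd e => dd.modify e 0 (· - 1)) (PySem.Dict.ofList I))
              = (((list_ori.drop (rn - kn)).take kn).foldl
                (fun dd e => dd.modify e 0 (· - 1)) (PySem.Dict.ofList I)) := by
            apply PySem.Dict.ext
            rw [foldl_modify_sub_items _ _ (fun e he => hmem_moved e (List.mem_reverse.mp he))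
                  (PySem.Dict.nodup_keys_ofList I),
                foldl_modify_sub_items _ _ hmem_moved (PySem.Dict.nodup_keys_ofList I)]
            apply List.map_congr_left
            intro p hp
            rw [List.count_reverse]
          rw [hdeq]
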